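-- pv_equiv track=rewrite | github.com/Ghoreish/usaco | beads/bread2.py | right1
-- ===== SOURCE A (Python) =====
-- def right1(x):
--     l = "begin"
--     n = 0
--     for i in range(-1,-len(x),-1):
--         if x[i] == l or l == "begin" or x[i] == "w":
--             n += 1
--         else:
--             break
--         if x[i] == "w":
--             continue
--         l = x[i]
--     return n
-- ===== SOURCE B (Python) =====
-- def right1(x):
--     seq = list(reversed(x[1:]))
--     color = None
--     for c in seq:
--         if c != "w":
--             color = c
--             break
--     n = 0
--     for c in seq:
--         if c == "w" or c == color:
--             n += 1
--         else:
--             break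
--     return n
-- ===== Notes on version B (the rewrite author's own statement) =====
-- stated objective: simpler
-- what changed: B replaces A's stateful scan with a mutating 'last colour' sentinel string by a two-phase decomposition: first find the first non-'w' bead of the reversed tail, then count the leading run of beads that are 'w' or that colour; the 'begin' sentinel disappears.
-- intended difference: On lists whose reversed tail's first non-'w' bead is the literal string 'begin' followed later by a bead that is neither 'w' nor 'begin', A's sentinel l == 'begin' collides with the bead value and A counts past the end of the run, while B stops at the first off-colour bead, which is the intended run count. — e.g. on right1(["h", "r", "begin"]): A returns 2, B returns 1
import Mathlib
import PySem

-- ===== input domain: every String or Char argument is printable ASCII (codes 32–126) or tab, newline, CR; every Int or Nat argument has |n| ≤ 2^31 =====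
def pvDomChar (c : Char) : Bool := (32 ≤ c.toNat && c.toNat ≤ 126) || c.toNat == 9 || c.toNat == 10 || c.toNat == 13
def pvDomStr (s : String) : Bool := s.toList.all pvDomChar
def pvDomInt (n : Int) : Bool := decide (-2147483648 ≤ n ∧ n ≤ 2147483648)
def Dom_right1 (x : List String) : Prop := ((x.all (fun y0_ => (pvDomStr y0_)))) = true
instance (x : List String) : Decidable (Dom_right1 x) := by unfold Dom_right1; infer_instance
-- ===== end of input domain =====

-- B replaces A's stateful sentinel scan by "find first colour, then count the leading run" (simpler decomposition); return value only, no mutation.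

-- ===== PORT A =====
-- x[i] is always in range for the indices A generates (-1 down to -(len-1)), so pyGetD is exact here.
def right1Loop (x : List String) : List Int → String → Int → Int
  | [], _, n => n
  | i :: rest, l, n =>
    let c := PySem.List.pyGetD x i ""
    if c = l ∨ l = "begin" ∨ c = "w" then
      if c = "w" then right1Loop x rest l (n + 1)
      else right1Loop x rest c (n + 1)
    else n

def right1 (x : List String) : Int :=
  right1Loop x (PySem.List.pyRange (-1) (-(x.length : Int)) (-1)) "begin" 0

-- ===== PORT B =====
-- Source B first loop: the first non-"w" bead of seq (None if all are "w")
def right1FirstColor : List String → Option String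
  | [] => none
  | c :: rest => if c ≠ "w" then some c else right1FirstColor rest

-- Source B second loop: count the leading run of beads that are "w" or equal to color
def right1CountRun (color : Option String) : List String → Int → Int
  | [], n => n
  | c :: rest, n => if c = "w" ∨ some c = color then right1CountRun color rest (n + 1) else n

def right1_alt (x : List String) : Int :=
  let seq := (PySem.List.slice x (some 1) none).reverse   -- list(reversed(x[1:]))
  right1CountRun (right1FirstColor seq) seq 0

-- ===== PRECONDITION & SPEC =====
-- On lists whose reversed tail's first non-"w" bead is the literal string "begin" followed later by a
-- bead that is neither "w" nor "begin", A's sentinel l == "begin" collides with the bead value and A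
-- counts past the end of the run, while B stops at the first off-colour bead, the intended run count.
def D_right1 (x : List String) : Prop :=
  let r := ((x.drop 1).reverse).dropWhile (· == "w")
  r.head? = some "begin" ∧ ∃ s ∈ r.tail, s ≠ "w" ∧ s ≠ "begin"
instance (x : List String) : Decidable (D_right1 x) := by unfold D_right1; infer_instance

def Spec_right1 (x : List String) (out : Int) : Prop := ¬ D_right1 x → out = right1_alt x
instance (x : List String) (out : Int) : Decidable (Spec_right1 x out) := by unfold Spec_right1; infer_instance

def pvDiffWitness_right1 : List String := ["h", "r", "begin"]
def pvDiffWitnessOut_right1 : Int × Int := (2, 1)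

-- ===== CLAIM (what is proved, stated in full; the proofs are below) =====
def Claim_unchanged_right1 : Prop := ∀ (x : List String), Dom_right1 x → Spec_right1 x (right1 x)
def Claim_changed_right1 : Prop := Dom_right1 (pvDiffWitness_right1) ∧ D_right1 (pvDiffWitness_right1) ∧ right1 (pvDiffWitness_right1) = pvDiffWitnessOut_right1.1 ∧ right1_alt (pvDiffWitness_right1) = pvDiffWitnessOut_right1.2 ∧ pvDiffWitnessOut_right1.1 ≠ pvDiffWitnessOut_right1.2
def Claim_exact_right1 : Prop := ∀ (x : List String), Dom_right1 x → D_right1 x → right1 x ≠ right1_alt x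

-- ===== LEMMAS AND PROOFS =====

-- A's loop only touches x through x[i]; replace the index list by the fetched values.
def right1LoopV : List String → String → Int → Int
  | [], _, n => n
  | c :: rest, l, n =>
    if c = l ∨ l = "begin" ∨ c = "w" then
      if c = "w" then right1LoopV rest l (n + 1)
      else right1LoopV rest c (n + 1)
    else n

theorem right1Loop_eq_V (x : List String) (idxs : List Int) (l : String) (n : Int) :
    right1Loop x idxs l n = right1LoopV (idxs.map (fun i => PySem.List.pyGetD x i "")) l n := by
  induction idxs generalizing l n with
  | nil => rfl
  | cons i rest ih =>
    simp only [right1Loop, right1LoopV, List.map_cons]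
    split_ifs <;> simp [ih]

theorem range_map_eq_seq (x : List String) :
    (PySem.List.pyRange (-1) (-(x.length : Int)) (-1)).map (fun i => PySem.List.pyGetD x i "")
      = (x.drop 1).reverse := by
  rw [PySem.List.pyRange_neg_one]
  have hlen : ((-1 : Int) - -(x.length : Int)).toNat = x.length - 1 := by omega
  rw [List.map_map]
  apply List.ext_getElem
  · simp; omega
  · intro t h1 h2
    simp only [List.getElem_map, List.getElem_range, Function.comp]
    have h2' : t < (x.drop 1).reverse.length := h2
    have ht : t < x.length - 1 := by simp at h2'; omega
    have hcast : (-1 : Int) - (t : Int) = -((t + 1 : Nat) : Int) := by push_cast; ring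
    rw [hcast, PySem.List.pyGetD_neg_natCast x (t + 1) "" (by omega) (by omega)]
    rw [List.getElem_reverse, List.getElem_drop]
    congr 1
    simp at h2' ⊢
    omega

theorem right1_eq_seq (x : List String) :
    right1 x = right1LoopV ((x.drop 1).reverse) "begin" 0 := by
  rw [right1, right1Loop_eq_V, range_map_eq_seq]

theorem alt_eq_seq (x : List String) :
    right1_alt x = right1CountRun (right1FirstColor ((x.drop 1).reverse)) ((x.drop 1).reverse) 0 := by
  simp [right1_alt, PySem.List.slice_from_one, List.drop_one]

-- steady phase, colour ≠ "begin"
theorem loopV_steady (seq : List String) (c : String) (hc : c ≠ "begin") (n : Int) :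
    right1LoopV seq c n = right1CountRun (some c) seq n := by
  induction seq generalizing n with
  | nil => rfl
  | cons d rest ih =>
    simp only [right1LoopV, right1CountRun]
    by_cases hdw : d = "w"
    · simp [hdw, ih]
    · by_cases hdc : d = c
      · subst hdc
        simp [hdw, hc, ih]
      · have hA : ¬(d = c ∨ c = "begin" ∨ d = "w") := by tauto
        have hB : ¬(d = "w" ∨ some d = some c) := by simp [hdw, hdc]
        rw [if_neg hA, if_neg hB]

-- steady phase, colour = "begin": both count everything when all beads are "w" or "begin"
theorem loopV_begin_all (seq : List String) (h : ∀ s ∈ seq, s = "w" ∨ s = "begin") (n : Int) :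
    right1LoopV seq "begin" n = n + seq.length := by
  induction seq generalizing n with
  | nil => simp [right1LoopV]
  | cons d rest ih =>
    have hd := h d (by simp)
    have hrest : ∀ s ∈ rest, s = "w" ∨ s = "begin" := fun s hs => h s (by simp [hs])
    simp only [right1LoopV]
    rcases hd with hd | hd <;> subst hd <;> simp [ih hrest] <;> ring

theorem countRun_begin_all (seq : List String) (h : ∀ s ∈ seq, s = "w" ∨ s = "begin") (n : Int) :
    right1CountRun (some "begin") seq n = n + seq.length := by
  induction seq generalizing n with
  | nil => simp [right1CountRun]
  | cons d rest ih =>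
    have hd := h d (by simp)
    have hrest : ∀ s ∈ rest, s = "w" ∨ s = "begin" := fun s hs => h s (by simp [hs])
    simp only [right1CountRun]
    rcases hd with hd | hd <;> subst hd <;> simp [ih hrest] <;> ring

-- the D_ condition expressed directly on seq
def DCond (seq : List String) : Prop :=
  ((seq.dropWhile (fun s => s == "w")).head? = some "begin") ∧
  (((seq.dropWhile (fun s => s == "w")).tail).any (fun s => !(s == "w") && !(s == "begin"))) = true

theorem main_seq (seq : List String) (h : ¬ DCond seq) (n : Int) :
    right1LoopV seq "begin" n = right1CountRun (right1FirstColor seq) seq n := by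
  induction seq generalizing n with
  | nil => rfl
  | cons d rest ih =>
    by_cases hdw : d = "w"
    · subst hdw
      have h' : ¬ DCond rest := by
        intro hr; exact h (by simpa [DCond, List.dropWhile] using hr)
      simp only [right1LoopV, right1FirstColor, right1CountRun]
      simp [ih h']
    · by_cases hdb : d = "begin"
      · subst hdb
        have hall : ∀ s ∈ rest, s = "w" ∨ s = "begin" := by
          intro s hs
          by_contra hc
          push_neg at hc
          apply h
          constructor
          · simp [List.dropWhile]
          · simp only [List.dropWhile_cons]
            simp only [show (("begin" : String) == "w") = false by decide]
            simp only [Bool.false_eq_true, if_false, List.tail_cons, List.any_eq_true]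
            exact ⟨s, hs, by simp [hc.1, hc.2]⟩
        simp only [right1LoopV, right1FirstColor, right1CountRun]
        simp [loopV_begin_all rest hall, countRun_begin_all rest hall]
      · simp only [right1LoopV, right1FirstColor, right1CountRun]
        simp [hdw, hdb, loopV_steady rest d hdb]

-- D_ ↔ DCond of seq
theorem D_iff (x : List String) : D_right1 x ↔ DCond ((x.drop 1).reverse) := by
  simp [D_right1, DCond, List.any_eq_true]

-- for tightness: the A-loop's count only grows
theorem loopV_ge (seq : List String) (l : String) (n : Int) : n ≤ right1LoopV seq l n := by
  induction seq generalizing l n with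
  | nil => simp [right1LoopV]
  | cons d rest ih =>
    simp only [right1LoopV]
    split_ifs with h1 h2
    · exact le_trans (by omega) (ih l (n + 1))
    · exact le_trans (by omega) (ih d (n + 1))
    · exact le_refl n

-- inside DCond: A counts strictly more than B
theorem tight_seq (seq : List String) (h : DCond seq) (n : Int) :
    right1CountRun (right1FirstColor seq) seq n < right1LoopV seq "begin" n := by
  induction seq generalizing n with
  | nil => exact absurd h.1 (by simp [List.dropWhile])
  | cons d rest ih =>
    by_cases hdw : d = "w"
    · subst hdw
      have h' : DCond rest := by simpa [DCond, List.dropWhile] using h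
      simp only [right1LoopV, right1FirstColor, right1CountRun]
      simp [ih h']
    · have hdb : d = "begin" := by
        have h1 := h.1
        simp only [List.dropWhile_cons, beq_iff_eq, hdw, if_false, List.head?_cons] at h1
        exact Option.some_injective _ h1
      subst hdb
      have hbad : rest.any (fun s => !(s == "w") && !(s == "begin")) = true := by
        have := h.2
        simpa [DCond, List.dropWhile] using this
      simp only [right1LoopV, right1FirstColor, right1CountRun]
      -- both count the "begin" head; then strict on rest, which holds a bad bead
      simpa using aux rest hbad (n + 1)
where
  aux : ∀ (rest : List String), rest.any (fun s => !(s == "w") && !(s == "begin")) = true →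
      ∀ (n : Int), right1CountRun (some "begin") rest n < right1LoopV rest "begin" n := by
    intro rest hbad
    induction rest with
    | nil => simp at hbad
    | cons d r ihr =>
      intro n
      by_cases hdw : d = "w"
      · subst hdw
        have h' : r.any (fun s => !(s == "w") && !(s == "begin")) = true := by simpa using hbad
        simp only [right1LoopV, right1CountRun]
        simp [ihr h']
      · by_cases hdb : d = "begin"
        · subst hdb
          have h' : r.any (fun s => !(s == "w") && !(s == "begin")) = true := by simpa using hbad
          simp only [right1LoopV, right1CountRun]
          simp [ihr h']
        · -- d is the bad bead: B stops, A counts it and keeps going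
          simp only [right1LoopV, right1CountRun]
          have hBcond : ¬(d = "w" ∨ some d = some "begin") := by simp [hdw, hdb]
          have hAcond : d = "begin" ∨ ("begin":String) = "begin" ∨ d = "w" := Or.inr (Or.inl rfl)
          have hge := loopV_ge r d (n + 1)
          simp only [if_neg hBcond]
          simp [hdw, hdb]
          omega

-- ===== VERDICT (by name: the statement is the Claim_ definition above) =====
theorem right1_spec : Claim_unchanged_right1 := by
  intro x _ hD
  rw [right1_eq_seq, alt_eq_seq]
  exact main_seq _ (by rwa [← D_iff]) 0

theorem right1_changed : Claim_changed_right1 := by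
  unfold Claim_changed_right1; decide

theorem right1_tight : Claim_exact_right1 := by
  intro x _ hD
  rw [right1_eq_seq, alt_eq_seq]
  have := tight_seq ((x.drop 1).reverse) ((D_iff x).mp hD) 0
  omega
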